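-- pv_equiv track=rewrite | github.com/brettwiens/Poon2026 | app.py | generate_snake_order
-- ===== SOURCE A (Python) =====
-- def generate_snake_order(n_players, n_rounds=10):
--     """Return list of pool-player indices in snake draft order."""
--     order = []
--     for rnd in range(n_rounds):
--         if rnd % 2 == 0:
--             order.extend(range(n_players))
--         else:
--             order.extend(range(n_players - 1, -1, -1))
--     return order
-- ===== SOURCE B (Python) =====
-- def generate_snake_order(n_players, n_rounds=10):
--     """Return list of pool-player indices in snake draft order."""
--     if n_players <= 0 or n_rounds <= 0:
--         return []
--     return [i % n_players if (i // n_players) % 2 == 0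
--             else n_players - 1 - i % n_players
--             for i in range(n_rounds * n_players)]
-- ===== Notes on version B (the rewrite author's own statement) =====
-- stated objective: alternative
-- what changed: Replaces the per-round loop that alternates two range objects with a single flat pass over range(n_rounds*n_players), deriving each entry arithmetically from divmod(i, n_players).
import Mathlib
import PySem

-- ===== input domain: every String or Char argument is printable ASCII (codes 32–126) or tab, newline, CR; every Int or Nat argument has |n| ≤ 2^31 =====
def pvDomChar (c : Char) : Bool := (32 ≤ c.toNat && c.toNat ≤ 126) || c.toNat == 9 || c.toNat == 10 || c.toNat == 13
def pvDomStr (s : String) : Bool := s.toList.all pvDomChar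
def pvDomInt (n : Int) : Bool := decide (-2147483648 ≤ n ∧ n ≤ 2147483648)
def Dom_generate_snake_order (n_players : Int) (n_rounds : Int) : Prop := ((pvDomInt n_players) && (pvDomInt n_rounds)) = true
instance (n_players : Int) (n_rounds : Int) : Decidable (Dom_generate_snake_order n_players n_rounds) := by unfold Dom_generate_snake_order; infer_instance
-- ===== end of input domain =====

-- B replaces A's per-round loop alternating two range objects by one flat arithmetic pass
-- over range(n_rounds*n_players) using i // n_players and i % n_players (alternative decomposition).


-- ===== PORT A =====
def generate_snake_order (n_players : Int) (n_rounds : Int) : List Int :=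
  (PySem.List.pyRange 0 n_rounds 1).foldl
    (fun order rnd =>
      if PySem.Int.mod rnd 2 = 0 then order ++ PySem.List.pyRange 0 n_players 1
      else order ++ PySem.List.pyRange (n_players - 1) (-1) (-1)) []

-- ===== PORT B =====
def generate_snake_order_alt (n_players : Int) (n_rounds : Int) : List Int :=
  if n_players ≤ 0 ∨ n_rounds ≤ 0 then []
  else
    (PySem.List.pyRange 0 (n_rounds * n_players) 1).map (fun i =>
      if PySem.Int.mod (PySem.Int.floordiv i n_players) 2 = 0 then PySem.Int.mod i n_players
      else n_players - 1 - PySem.Int.mod i n_players)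

-- ===== PRECONDITION & SPEC =====
def Spec_generate_snake_order (n_players : Int) (n_rounds : Int) (out : List Int) : Prop := out = generate_snake_order_alt n_players n_rounds
instance (n_players : Int) (n_rounds : Int) (out : List Int) : Decidable (Spec_generate_snake_order n_players n_rounds out) := by unfold Spec_generate_snake_order; infer_instance

-- ===== CLAIM (what is proved, stated in full; the proofs are below) =====
def Claim_equal_generate_snake_order : Prop := ∀ (n_players : Int) (n_rounds : Int), Dom_generate_snake_order n_players n_rounds → Spec_generate_snake_order n_players n_rounds (generate_snake_order n_players n_rounds)

-- ===== LEMMAS AND PROOFS =====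

-- A's per-round block, as produced by the flatMap view of A's fold.
def pvRoundBlock (p : Int) (rnd : Int) : List Int :=
  if PySem.Int.mod rnd 2 = 0 then PySem.List.pyRange 0 p 1
  else PySem.List.pyRange (p - 1) (-1) (-1)

lemma pvA_eq_flatMap (p r : Int) :
    generate_snake_order p r = (PySem.List.pyRange 0 r 1).flatMap (pvRoundBlock p) := by
  have hf : (fun (order : List Int) rnd =>
      if PySem.Int.mod rnd 2 = 0 then order ++ PySem.List.pyRange 0 p 1
      else order ++ PySem.List.pyRange (p - 1) (-1) (-1))
      = fun (order : List Int) rnd => order ++ pvRoundBlock p rnd := by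
    funext o rnd; unfold pvRoundBlock; split <;> rfl
  rw [generate_snake_order, hf, PySem.List.foldl_append_eq_flatMap]
  simp

-- B's block for round m equals A's block, for 0 < p.
lemma pvBlock_eq (p : Int) (hp : 0 < p) (m : Nat) :
    (PySem.List.pyRange ((m : Int) * p) (((m : Int) + 1) * p) 1).map (fun i =>
      if PySem.Int.mod (PySem.Int.floordiv i p) 2 = 0 then PySem.Int.mod i p
      else p - 1 - PySem.Int.mod i p) = pvRoundBlock p (m : Int) := by
  have hdiff : ((m : Int) + 1) * p - (m : Int) * p = p := by ring
  rw [PySem.List.pyRange_one, hdiff, List.map_map]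
  have hkey : ∀ k : Nat, k < p.toNat →
      PySem.Int.floordiv ((m : Int) * p + (k : Int)) p = (m : Int) ∧
      PySem.Int.mod ((m : Int) * p + (k : Int)) p = (k : Int) := by
    intro k hk
    have hkp : (k : Int) < p := by omega
    have hd : PySem.Int.floordiv ((m : Int) * p + (k : Int)) p = (m : Int) := by
      rw [PySem.Int.floordiv_eq_iff_of_pos hp]
      constructor
      · have : (0:Int) ≤ (k:Int) := by positivity
        linarith
      · have : ((m : Int) + 1) * p = (m : Int) * p + p := by ring
        linarith
    refine ⟨hd, ?_⟩
    have hm := PySem.Int.floordiv_mul_add_mod ((m : Int) * p + (k : Int)) p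
    rw [hd] at hm
    linarith
  unfold pvRoundBlock
  by_cases hpar : PySem.Int.mod (m : Int) 2 = 0
  · rw [if_pos hpar, PySem.List.pyRange_one]
    simp only [sub_zero, zero_add]
    refine List.map_congr_left ?_
    intro k hk
    have hk' := (List.mem_range).1 hk
    obtain ⟨hd, hm⟩ := hkey k hk'
    simp only [Function.comp]
    rw [hd, hm, if_pos hpar]
  · rw [if_neg hpar, PySem.List.pyRange_neg_one]
    have hn : (p - 1 - (-1)).toNat = p.toNat := by omega
    rw [hn]
    refine List.map_congr_left ?_
    intro k hk
    have hk' := (List.mem_range).1 hk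
    obtain ⟨hd, hm⟩ := hkey k hk'
    simp only [Function.comp]
    rw [hd, hm, if_neg hpar]

lemma pvMain (p : Int) (hp : 0 < p) (m : Nat) :
    (PySem.List.pyRange 0 (m : Int) 1).flatMap (pvRoundBlock p)
      = (PySem.List.pyRange 0 ((m : Int) * p) 1).map (fun i =>
          if PySem.Int.mod (PySem.Int.floordiv i p) 2 = 0 then PySem.Int.mod i p
          else p - 1 - PySem.Int.mod i p) := by
  induction m with
  | zero =>
      simp [PySem.List.pyRange_one_eq_nil (le_refl (0:Int))]
  | succ m ih =>
      have hc : ((m + 1 : Nat) : Int) = (m : Int) + 1 := by push_cast; ring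
      rw [hc, PySem.List.pyRange_one_succ_right (by positivity : (0:Int) ≤ (m : Int)),
        PySem.List.pyRange_one_append 0 ((m : Int) * p) (((m : Int) + 1) * p)
          (by positivity) (by nlinarith)]
      rw [List.flatMap_append, List.map_append, ih, pvBlock_eq p hp m]
      simp

-- ===== VERDICT (by name: the statement is the Claim_ definition above) =====
theorem generate_snake_order_spec : Claim_equal_generate_snake_order := by
  intro p r _
  unfold Spec_generate_snake_order generate_snake_order_alt
  rw [pvA_eq_flatMap]
  by_cases hcase : p ≤ 0 ∨ r ≤ 0
  · simp only [if_pos hcase]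
    rcases hcase with hp | hr
    · have hb : ∀ x : Int, pvRoundBlock p x = [] := by
        intro x; unfold pvRoundBlock; split
        · exact PySem.List.pyRange_one_eq_nil (by omega)
        · exact PySem.List.pyRange_neg_one_eq_nil (by omega)
      simp [hb]
    · rw [PySem.List.pyRange_one_eq_nil hr]
      simp
  · push Not at hcase
    obtain ⟨hp, hr⟩ := hcase
    simp only [if_neg (by push Not; exact ⟨hp, hr⟩ : ¬ (p ≤ 0 ∨ r ≤ 0))]
    obtain ⟨m, rfl⟩ : ∃ m : Nat, r = (m : Int) := ⟨r.toNat, by omega⟩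
    exact pvMain p hp m
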